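-- pv_equiv track=rewrite | github.com/daniel-reich/ubiquitous-fiesta | vudQZFD64nDWkKz8a_9.py | grant_the_hint
-- ===== SOURCE A (Python) =====
-- def grant_the_hint(txt):
--   a = []
--   m = txt.split()
--   n = len(max(m, key=len))
--   for x in m:
--     l = len(x)
--     a.append([x[:i] + (l - i) * '_'  for i in range(n+1)])
--   return list(map(lambda x: ' '.join(x), zip(*a)))
-- ===== SOURCE B (Python) =====
-- def grant_the_hint(txt):
--   m = txt.split()
--   n = len(max(m, key=len))
--   cur = [['_'] * len(x) for x in m]
--   out = [' '.join(''.join(c) for c in cur)]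
--   for i in range(n):
--     for w, c in zip(m, cur):
--       if i < len(w):
--         c[i] = w[i]
--     out.append(' '.join(''.join(c) for c in cur))
--   return out
-- ===== Notes on version B (the rewrite author's own statement) =====
-- stated objective: alternative
-- what changed: B replaces A's build-all-stages-per-word-then-zip(*)-transpose with an incremental reveal: it keeps a mutable masked copy of each word (all underscores) and in each round uncovers one more letter position in place, emitting a row per round.
import Mathlib
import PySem

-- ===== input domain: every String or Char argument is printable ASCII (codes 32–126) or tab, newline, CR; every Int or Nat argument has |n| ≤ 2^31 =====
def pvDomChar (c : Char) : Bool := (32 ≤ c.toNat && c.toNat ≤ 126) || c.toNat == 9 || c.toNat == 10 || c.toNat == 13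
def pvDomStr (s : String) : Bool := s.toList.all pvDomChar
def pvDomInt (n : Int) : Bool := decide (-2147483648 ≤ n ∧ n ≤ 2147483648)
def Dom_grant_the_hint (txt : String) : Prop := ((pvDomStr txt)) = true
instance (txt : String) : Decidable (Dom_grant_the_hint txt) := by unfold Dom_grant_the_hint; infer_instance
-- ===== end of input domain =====

-- B is an incremental reveal: it keeps mutable masked copies of the words and uncovers one
-- letter position per round, instead of recomputing every prefix+padding cell and transposing
-- with zip(*a) (objective: alternative decomposition, same cost).

-- ===== PORT A =====
-- heads-and-tails of every row, if all rows are nonempty (how zip stops at the shortest)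
def pvHeadsTails {α : Type} : List (List α) → Option (List α × List (List α))
  | [] => some ([], [])
  | [] :: _ => none
  | (h :: t) :: rest =>
      match pvHeadsTails rest with
      | none => none
      | some (hs, ts) => some (h :: hs, t :: ts)

def pvZipStarAux {α : Type} : List α → List (List α) → List (List α)
  | [], _ => []
  | x :: xs, rest =>
      match pvHeadsTails rest with
      | none => []
      | some (hs, ts) => (x :: hs) :: pvZipStarAux xs ts

-- zip(*a): columns of a, truncated at the shortest row
def pvZipStar {α : Type} : List (List α) → List (List α)
  | [] => []
  | r0 :: rest => pvZipStarAux r0 rest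

def grant_the_hint (txt : String) : List String :=
  let m := PySem.Str.split₀ txt
  match PySem.List.max? m (fun x => PySem.Str.len x) with
  | none => []  -- Python raises ValueError here (max of empty); excluded by Pre_
  | some mx =>
    let n := (PySem.Str.len mx).toNat  -- len(...) ≥ 0, so range(n+1) is List.range (n+1)
    -- x[:i] + (l - i) * '_' : Nat subtraction saturates at 0, exactly Python's negative repeat = ''
    let a := m.map (fun x => (List.range (n + 1)).map (fun i =>
      String.ofList (x.toList.take i ++ List.replicate (x.toList.length - i) '_')))
    (pvZipStar a).map (fun row => PySem.Str.join " " row)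

-- ===== PORT B =====
def grant_the_hint_alt (txt : String) : List String :=
  let m := PySem.Str.split₀ txt
  match PySem.List.max? m (fun x => PySem.Str.len x) with
  | none => []  -- Python raises ValueError here (max of empty); excluded by Pre_
  | some mx =>
    let n := (PySem.Str.len mx).toNat
    let words := m.map String.toList
    let cur0 := words.map (fun w => List.replicate w.length '_')
    ((List.range n).foldl (fun (st : List (List Char) × List String) i =>
        -- for w, c in zip(m, cur): if i < len(w): c[i] = w[i]   (in-place update of the masks)
        let cur' := (words.zip st.1).map (fun wc =>
          if i < wc.1.length then wc.2.set i (wc.1.getD i '_') else wc.2)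
        (cur', st.2 ++ [PySem.Str.join " " (cur'.map String.ofList)]))
      (cur0, [PySem.Str.join " " (cur0.map String.ofList)])).2

-- ===== PRECONDITION & SPEC =====
-- Pre_ excludes whitespace-only txt (txt.split() == []), on which both Pythons raise ValueError in max().
def Pre_grant_the_hint (txt : String) : Prop := PySem.Str.split₀ txt ≠ []
instance (txt : String) : Decidable (Pre_grant_the_hint txt) := by unfold Pre_grant_the_hint; infer_instance
def pvWitness_grant_the_hint : String := "hi there pal"

def Spec_grant_the_hint (txt : String) (out : List String) : Prop := out = grant_the_hint_alt txt
instance (txt : String) (out : List String) : Decidable (Spec_grant_the_hint txt out) := by unfold Spec_grant_the_hint; infer_instance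

-- ===== CLAIM (what is proved, stated in full; the proofs are below) =====
def Claim_equal_grant_the_hint : Prop := ∀ (txt : String), Dom_grant_the_hint txt → Pre_grant_the_hint txt → Spec_grant_the_hint txt (grant_the_hint txt)

-- ===== LEMMAS AND PROOFS =====

-- the mask of word w after i letters are revealed
def pvMask (i : Nat) (w : List Char) : List Char :=
  w.take i ++ List.replicate (w.length - i) '_'

theorem pvMask_zero (w : List Char) : pvMask 0 w = List.replicate w.length '_' := rfl

-- one reveal step turns the i-mask into the (i+1)-mask
theorem pvMask_step (i : Nat) (w : List Char) :
    (if i < w.length then (pvMask i w).set i (w.getD i '_') else pvMask i w) = pvMask (i+1) w := by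
  by_cases h : i < w.length
  · simp only [h, if_true, pvMask]
    have hlen : (w.take i).length = i := by simp; omega
    have hrep : w.length - i = (w.length - (i+1)) + 1 := by omega
    rw [List.set_append, hlen, if_neg (lt_irrefl i), Nat.sub_self, hrep,
      List.replicate_succ, List.set_cons_zero]
    have ht : w.take (i+1) = w.take i ++ [w[i]] := by
      rw [List.take_add_one, List.getElem?_eq_getElem h]; rfl
    rw [ht, List.append_assoc]
    simp [List.getD, List.getElem?_eq_getElem h]
  · simp only [h, if_false, pvMask]
    have h1 : w.take i = w := List.take_of_length_le (by omega)
    have h2 : w.take (i+1) = w := List.take_of_length_le (by omega)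
    have h3 : w.length - i = 0 := by omega
    have h4 : w.length - (i+1) = 0 := by omega
    rw [h1, h2, h3, h4]

-- mapping over zip l (l.map f)
theorem pvZipSelf_map {α β γ : Type} (f : α → β) (g : α → β → γ) (l : List α) :
    ((l.zip (l.map f)).map (fun p => g p.1 p.2)) = l.map (fun x => g x (f x)) := by
  induction l with
  | nil => rfl
  | cons x xs ih => simp [ih]

-- loop invariant of B: after k rounds the masks show k letters and the output holds rows 0..k
theorem pvFold_inv (words : List (List Char)) (k : Nat) :
    ((List.range k).foldl (fun (st : List (List Char) × List String) i =>
        let cur' := (words.zip st.1).map (fun wc =>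
          if i < wc.1.length then wc.2.set i (wc.1.getD i '_') else wc.2)
        (cur', st.2 ++ [PySem.Str.join " " (cur'.map String.ofList)]))
      (words.map (pvMask 0), [PySem.Str.join " " ((words.map (pvMask 0)).map String.ofList)]))
    = (words.map (pvMask k),
       (List.range (k+1)).map (fun i => PySem.Str.join " " ((words.map (pvMask i)).map String.ofList))) := by
  induction k with
  | zero => simp
  | succ k ih =>
      rw [List.range_succ, List.foldl_append, ih]
      have hcur : ((words.zip (words.map (pvMask k))).map (fun wc =>
          if k < wc.1.length then wc.2.set k (wc.1.getD k '_') else wc.2))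
          = words.map (pvMask (k+1)) := by
        rw [pvZipSelf_map (pvMask k)
          (fun w c => if k < w.length then c.set k (w.getD k '_') else c) words]
        exact List.map_congr_left (fun w _ => pvMask_step k w)
      simp only [List.foldl_cons, List.foldl_nil, hcur]
      rw [List.range_succ (n := k+1), List.map_append]
      rfl

-- heads/tails of a list of rows all shaped `g x i :: l'.map (g x)`
theorem pvHeadsTails_map {α β : Type} (g : β → Nat → α) (i : Nat) (l' : List Nat) (ms : List β) :
    pvHeadsTails (ms.map (fun x => g x i :: l'.map (g x))) =
      some (ms.map (fun x => g x i), ms.map (fun x => l'.map (g x))) := by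
  induction ms with
  | nil => rfl
  | cons y ys ih => simp [pvHeadsTails, ih]

theorem pvZipStarAux_map {α β : Type} (g : β → Nat → α) (l : List Nat) (x0 : β) (ms : List β) :
    pvZipStarAux (l.map (g x0)) (ms.map (fun x => l.map (g x))) =
      l.map (fun i => (x0 :: ms).map (fun x => g x i)) := by
  induction l generalizing ms with
  | nil => rfl
  | cons i l' ih =>
      simp only [List.map_cons, pvZipStarAux, pvHeadsTails_map g i l' ms]
      simp [ih]

-- zip(*[[g x i for i in l] for x in m]) = [[g x i for x in m] for i in l], for nonempty m
theorem pvZipStar_map {α β : Type} (g : β → Nat → α) (l : List Nat) (x0 : β) (ms : List β) :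
    pvZipStar ((x0 :: ms).map (fun x => l.map (g x))) =
      l.map (fun i => (x0 :: ms).map (fun x => g x i)) := by
  simp only [List.map_cons, pvZipStar]
  exact pvZipStarAux_map g l x0 ms

-- ===== VERDICT (by name: the statement is the Claim_ definition above) =====
theorem grant_the_hint_spec : Claim_equal_grant_the_hint := by
  intro txt _ hpre
  unfold Spec_grant_the_hint grant_the_hint grant_the_hint_alt
  cases hmax : PySem.List.max? (PySem.Str.split₀ txt) (fun x => PySem.Str.len x) with
  | none =>
      exact absurd ((PySem.List.max?_eq_none_iff _ _).mp hmax) hpre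
  | some mx =>
      cases hm : PySem.Str.split₀ txt with
      | nil => exact absurd hm hpre
      | cons x0 ms =>
          rw [hm] at hmax
          simp only [hmax]
          set n := (PySem.Str.len mx).toNat with hn
          -- A's side: transpose becomes a row-indexed map
          rw [pvZipStar_map (fun x i => String.ofList (x.toList.take i ++ List.replicate (x.toList.length - i) '_'))
              (List.range (n + 1)) x0 ms, List.map_map]
          -- B's side: the fold invariant
          have h0 : ((x0 :: ms).map String.toList).map (fun w => List.replicate w.length '_')
              = ((x0 :: ms).map String.toList).map (pvMask 0) := by
            simp [pvMask_zero]
          simp only [h0, pvFold_inv ((x0 :: ms).map String.toList) n]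
          simp only [Function.comp_def]
          apply List.map_congr_left
          intro a _
          rw [List.map_map, List.map_map]
          rfl
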